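-- pv_equiv track=rewrite | github.com/nayannair/flacFPGA | Hardware/Encoder/utilities.py | fixed_lpc
-- ===== SOURCE A (Python) =====
-- def fixed_lpc(channel, num_samples, pred_ord):
--     fixed_coeffs = [[0], [1], [2, -1], [3, -3, 1], [4, -6, 4, -1]]
--     residuals = [0 for i in range(num_samples - pred_ord)]
--     chan_ind = pred_ord - 1
--     resid_ind = 0
--     while resid_ind < num_samples - pred_ord:
--         pred = 0
--         count = 0
--         while count < pred_ord:
--             pred += fixed_coeffs[pred_ord][count] * channel[chan_ind - count]
--             count += 1
--         chan_ind += 1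
--         residuals[resid_ind] = channel[chan_ind] - pred
--         resid_ind += 1
--     return residuals
-- ===== SOURCE B (Python) =====
-- def fixed_lpc(channel, num_samples, pred_ord):
--     seq = list(channel[:num_samples])
--     if pred_ord >= len(seq):
--         return []
--     for _ in range(pred_ord):
--         seq = [b - a for a, b in zip(seq, seq[1:])]
--     return seq
-- ===== Notes on version B (the rewrite author's own statement) =====
-- stated objective: simpler
-- what changed: Replaces the signed-coefficient table with its dot-product inner loop by pred_ord successive first-difference passes over the leading slice (the fixed LPC residual of order p is the p-th finite difference), with no coefficient table and no index arithmetic.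
-- outside the precondition, e.g. on fixed_lpc([1, 2, 3], 2, -1): A returns [3, 1, 2], B returns [1, 2]; on fixed_lpc([1, 2, 3], -1, 1): A returns [], B returns [1]; on fixed_lpc([1, 2], 5, 1): A raises IndexError, B returns [1]
import Mathlib
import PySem

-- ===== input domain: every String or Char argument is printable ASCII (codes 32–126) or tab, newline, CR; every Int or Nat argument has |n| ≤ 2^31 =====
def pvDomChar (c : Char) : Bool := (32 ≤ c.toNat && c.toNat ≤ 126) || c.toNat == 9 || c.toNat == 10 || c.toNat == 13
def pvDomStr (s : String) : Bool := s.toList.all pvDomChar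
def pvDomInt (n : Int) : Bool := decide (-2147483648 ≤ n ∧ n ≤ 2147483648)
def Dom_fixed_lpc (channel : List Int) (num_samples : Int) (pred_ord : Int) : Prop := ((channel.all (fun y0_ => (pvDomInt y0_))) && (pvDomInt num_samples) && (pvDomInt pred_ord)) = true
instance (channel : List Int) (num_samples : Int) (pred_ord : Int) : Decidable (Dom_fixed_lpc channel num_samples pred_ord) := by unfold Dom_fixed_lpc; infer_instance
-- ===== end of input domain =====

-- B computes the order-p fixed LPC residual as p successive first-difference passes over channel[:num_samples],
-- replacing A's signed-coefficient table and its dot-product inner loop; objective: simpler (not faster).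


-- ===== PORT A =====
-- fixed_coeffs = [[0], [1], [2, -1], [3, -3, 1], [4, -6, 4, -1]]
def pvCoeffs : List (List Int) := [[0], [1], [2, -1], [3, -3, 1], [4, -6, 4, -1]]

-- inner while loop: count = 0; while count < pred_ord: pred += fixed_coeffs[pred_ord][count] * channel[chan_ind - count]
def pvInner (channel : List Int) (pred_ord chan_ind : Int) : Int :=
  (PySem.List.pyRange 0 pred_ord 1).foldl
    (fun pred count =>
      pred + PySem.List.pyGetD (PySem.List.pyGetD pvCoeffs pred_ord []) count 0
               * PySem.List.pyGetD channel (chan_ind - count) 0) 0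

-- outer while loop: while resid_ind < num_samples - pred_ord (runs (num_samples - pred_ord).toNat times since
-- resid_ind starts at 0 and steps by 1; the pyGetD defaults are never reached on inputs inside Pre_fixed_lpc)
def pvLoopA (channel : List Int) (pred_ord : Int) : Nat → Int → Int → List Int → List Int
  | 0, _, _, residuals => residuals
  | fuel + 1, chan_ind, resid_ind, residuals =>
    let pred := pvInner channel pred_ord chan_ind
    let chan_ind' := chan_ind + 1
    let residuals' := residuals.set resid_ind.toNat (PySem.List.pyGetD channel chan_ind' 0 - pred)
    pvLoopA channel pred_ord fuel chan_ind' (resid_ind + 1) residuals'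

def fixed_lpc (channel : List Int) (num_samples : Int) (pred_ord : Int) : List Int :=
  let residuals : List Int := List.replicate (num_samples - pred_ord).toNat 0
  pvLoopA channel pred_ord (num_samples - pred_ord).toNat (pred_ord - 1) 0 residuals

-- ===== PORT B =====
-- seq = [b - a for a, b in zip(seq, seq[1:])]   (seq[1:] on a list is drop 1)
def pvDiff (seq : List Int) : List Int := List.zipWith (fun a b => b - a) seq (seq.drop 1)

-- seq = list(channel[:num_samples]); early [] when the order meets or exceeds the slice;
-- then: for _ in range(pred_ord): seq = pvDiff seq
def fixed_lpc_alt (channel : List Int) (num_samples : Int) (pred_ord : Int) : List Int :=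
  if ((PySem.List.slice channel none (some num_samples)).length : Int) ≤ pred_ord then []
  else pvDiff^[pred_ord.toNat] (PySem.List.slice channel none (some num_samples))

-- ===== PRECONDITION & SPEC =====
-- Pre_ covers the function's natural domain — a nonnegative sample count, order 0..4 (the rows of A's fixed-coefficient
-- table) with the channel holding every sample the loop reads, or any nonnegative degenerate pair with no residual to
-- produce — plus, among the negative counts/orders (outside the natural domain), the pairs where the slice B differences
-- is already exhausted; the remaining negative inputs are excluded because A's values there (an empty list for a
-- negative count, or nonempty values read by negative-index wraparound) are accidents of its while-loop indexing, and
-- so are the inputs where A raises IndexError (num_samples beyond the channel, order ≥ 5).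
def Pre_fixed_lpc (channel : List Int) (num_samples : Int) (pred_ord : Int) : Prop :=
  (0 ≤ pred_ord ∧ 0 ≤ num_samples ∧
    (num_samples ≤ pred_ord ∨ (pred_ord ≤ 4 ∧ num_samples ≤ (channel.length : Int))))
  ∨ (num_samples < 0 ∧ 0 ≤ pred_ord ∧ (channel.length : Int) + num_samples ≤ pred_ord)
  ∨ (num_samples ≤ pred_ord ∧ pred_ord < 0 ∧ (channel.length : Int) + num_samples ≤ 0)
instance (channel : List Int) (num_samples : Int) (pred_ord : Int) : Decidable (Pre_fixed_lpc channel num_samples pred_ord) := by unfold Pre_fixed_lpc; infer_instance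

def pvWitness_fixed_lpc : List Int × Int × Int := ([3, 1, 4, 1, 5], 5, 2)

def Spec_fixed_lpc (channel : List Int) (num_samples : Int) (pred_ord : Int) (out : List Int) : Prop := out = fixed_lpc_alt channel num_samples pred_ord
instance (channel : List Int) (num_samples : Int) (pred_ord : Int) (out : List Int) : Decidable (Spec_fixed_lpc channel num_samples pred_ord out) := by unfold Spec_fixed_lpc; infer_instance

-- ===== CLAIM (what is proved, stated in full; the proofs are below) =====
def Claim_equal_fixed_lpc : Prop := ∀ (channel : List Int) (num_samples : Int) (pred_ord : Int), Dom_fixed_lpc channel num_samples pred_ord → Pre_fixed_lpc channel num_samples pred_ord → Spec_fixed_lpc channel num_samples pred_ord (fixed_lpc channel num_samples pred_ord)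


-- ===== LEMMAS AND PROOFS =====

theorem take_set_snoc (l : List Int) (k : Nat) (v : Int) (h : k < l.length) :
    (l.set k v).take (k+1) = l.take k ++ [v] := by
  apply List.ext_getElem
  · simp; omega
  intro i h1 h2
  simp only [List.getElem_take, List.getElem_set]
  rcases Nat.lt_or_ge i k with hik | hik
  · rw [if_neg (by omega), List.getElem_append_left (by simp; omega)]
    simp [List.getElem_take]
  · have : i = k := by simp at h1; omega
    subst this
    rw [if_pos rfl, List.getElem_append_right (by simp)]
    simp

theorem pvLoopA_spec (channel : List Int) (pred_ord : Int) (fuel k : Nat) (residuals : List Int)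
    (hlen : residuals.length = k + fuel) :
    pvLoopA channel pred_ord fuel (pred_ord - 1 + (k : Int)) (k : Int) residuals
      = residuals.take k ++ (List.range fuel).map
          (fun (j : Nat) => PySem.List.pyGetD channel (pred_ord + (k : Int) + (j : Int)) 0
            - pvInner channel pred_ord (pred_ord - 1 + (k : Int) + (j : Int))) := by
  induction fuel generalizing k residuals with
  | zero => simp [pvLoopA, List.take_of_length_le (show residuals.length ≤ k by omega)]
  | succ fuel ih =>
    rw [pvLoopA]
    set v := PySem.List.pyGetD channel (pred_ord - 1 + (k : Int) + 1) 0
      - pvInner channel pred_ord (pred_ord - 1 + (k : Int)) with hv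
    have h3 : ((k : Int)).toNat = k := by omega
    rw [h3,
      show pred_ord - 1 + (k : Int) + 1 = pred_ord - 1 + ((k + 1 : Nat) : Int) by push_cast; ring,
      show (k : Int) + 1 = ((k + 1 : Nat) : Int) by push_cast; ring,
      ih (k + 1) _ (by simp [hlen]; omega),
      take_set_snoc residuals k v (by omega), List.append_assoc]
    congr 1
    rw [List.range_succ_eq_map]
    simp only [List.map_cons, List.map_map, List.singleton_append, hv]
    congr 1
    · ring_nf
    · apply List.map_congr_left
      intro j _
      simp only [Function.comp, Nat.succ_eq_add_one]
      push_cast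
      ring_nf

theorem pvDiff_length (s : List Int) : (pvDiff s).length = s.length - 1 := by
  simp [pvDiff]

theorem pvDiff_getElem (s : List Int) (i : Nat) (h : i < (pvDiff s).length) :
    (pvDiff s)[i] = s[i + 1]'(by simp [pvDiff] at h; omega) - s[i]'(by simp [pvDiff] at h; omega) := by
  simp [pvDiff]

theorem pvDiff_iterate_length (k : Nat) (s : List Int) :
    (pvDiff^[k] s).length = s.length - k := by
  induction k generalizing s with
  | zero => simp
  | succ k ih =>
    rw [Function.iterate_succ_apply, ih, pvDiff_length]
    omega

theorem fixed_lpc_char (channel : List Int) (num_samples pred_ord : Int) :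
    fixed_lpc channel num_samples pred_ord
      = (List.range (num_samples - pred_ord).toNat).map
          (fun (j : Nat) => PySem.List.pyGetD channel (pred_ord + (j : Int)) 0
            - pvInner channel pred_ord (pred_ord - 1 + (j : Int))) := by
  unfold fixed_lpc
  have := pvLoopA_spec channel pred_ord (num_samples - pred_ord).toNat 0
    (List.replicate (num_samples - pred_ord).toNat 0) (by simp)
  simp only [Nat.cast_zero, add_zero] at this
  rw [this]
  simp

-- channel[:num_samples] for a negative num_samples
theorem neg_slice_length (channel : List Int) (num_samples : Int) (hns : num_samples < 0) :
    (PySem.List.slice channel none (some num_samples)).length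
      = (channel.length - (-num_samples).toNat : Nat) := by
  obtain ⟨k, hk, rfl⟩ : ∃ k : Nat, 0 < k ∧ num_samples = -(k : Int) :=
    ⟨(-num_samples).toNat, by omega, by omega⟩
  rw [PySem.List.slice_to_neg_natCast channel k hk]
  simp

-- both programs return [] when there is no residual to produce and B's slice is already differenced away
theorem degenerate_eq (channel : List Int) (num_samples pred_ord : Int)
    (hA : (num_samples - pred_ord).toNat = 0)
    (hB : (PySem.List.slice channel none (some num_samples)).length ≤ pred_ord.toNat) :
    fixed_lpc channel num_samples pred_ord = fixed_lpc_alt channel num_samples pred_ord := by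
  unfold fixed_lpc fixed_lpc_alt
  rw [hA]
  simp only [List.replicate, pvLoopA]
  by_cases hif : ((PySem.List.slice channel none (some num_samples)).length : Int) ≤ pred_ord
  · rw [if_pos hif]
  · rw [if_neg hif]
    exact (List.length_eq_zero_iff.mp (by rw [pvDiff_iterate_length]; omega)).symm

theorem main_eq (channel : List Int) (num_samples pred_ord : Int)
    (hns : 0 ≤ num_samples) (hp0 : 0 ≤ pred_ord)
    (hd : num_samples ≤ pred_ord ∨ (pred_ord ≤ 4 ∧ num_samples ≤ (channel.length : Int))) :
    fixed_lpc channel num_samples pred_ord = fixed_lpc_alt channel num_samples pred_ord := by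
  unfold fixed_lpc_alt
  rw [show num_samples = ((num_samples.toNat : Nat) : Int) by omega, PySem.List.slice_to_natCast]
  set seq := channel.take num_samples.toNat with hseq
  rw [fixed_lpc_char]
  by_cases hle : num_samples ≤ pred_ord
  · have hA : (((num_samples.toNat : Nat) : Int) - pred_ord).toNat = 0 := by omega
    have hB : seq.length ≤ pred_ord.toNat := by
      have : seq.length ≤ num_samples.toNat := by simp [hseq]
      omega
    rw [hA]
    simp only [List.range_zero, List.map_nil]
    rw [if_pos (by omega)]
  · obtain ⟨hp4, hlen⟩ : pred_ord ≤ 4 ∧ num_samples ≤ (channel.length : Int) := by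
      rcases hd with h | h
      · omega
      · exact h
    have hseqlen : seq.length = num_samples.toNat := by simp [hseq]; omega
    have hch : ∀ (i : Nat) (hi : i < seq.length),
        PySem.List.pyGetD channel ((i : Nat) : Int) 0 = seq[i]'hi := by
      intro i hi
      simp only [hseq, List.getElem_take]
      rw [PySem.List.pyGetD_natCast]
      exact (List.getD_eq_getElem channel 0 (by rw [hseqlen] at hi; omega)).trans (by simp)
    rw [if_neg (by omega)]
    apply List.ext_getElem
    · rw [List.length_map, List.length_range, pvDiff_iterate_length]
      omega
    intro r h1 h2
    simp only [List.getElem_map, List.getElem_range]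
    have hr : r < (((num_samples.toNat : Nat) : Int) - pred_ord).toNat := by simpa using h1
    interval_cases pred_ord
    · have e0 : pvDiff^[Int.toNat 0] seq = seq := rfl
      simp only [e0] at h2 ⊢
      rw [pvInner, show PySem.List.pyRange 0 0 1 = [] from by decide]
      simp only [List.foldl_nil]
      rw [show (0 : Int) + (r : Int) = ((r : Nat) : Int) by ring, hch r (by omega)]
      ring
    · have e1 : pvDiff^[Int.toNat 1] seq = pvDiff seq := rfl
      simp only [e1] at h2 ⊢
      rw [pvInner, show PySem.List.pyRange 0 1 1 = [0] from by decide]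
      simp only [List.foldl_cons, List.foldl_nil,
        show PySem.List.pyGetD pvCoeffs 1 [] = [1] from by decide,
        show PySem.List.pyGetD [1] (0 : Int) (0 : Int) = 1 from by decide]
      rw [pvDiff_getElem _ _ h2]
      rw [show (1 : Int) + (r : Int) = ((r + 1 : Nat) : Int) by push_cast; ring,
        show (1 : Int) - 1 + (r : Int) - 0 = ((r : Nat) : Int) by ring,
        hch (r + 1) (by omega), hch r (by omega)]
      ring
    · rw [pvInner, show PySem.List.pyRange 0 2 1 = [0, 1] from by decide]
      simp only [List.foldl_cons, List.foldl_nil,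
        show PySem.List.pyGetD pvCoeffs 2 [] = [2, -1] from by decide,
        show PySem.List.pyGetD [2, -1] (0 : Int) (0 : Int) = 2 from by decide,
        show PySem.List.pyGetD [2, -1] (1 : Int) (0 : Int) = -1 from by decide]
      have e2 : pvDiff^[Int.toNat 2] seq = pvDiff (pvDiff seq) := rfl
      simp only [e2] at h2 ⊢
      rw [pvDiff_getElem _ _ h2]
      repeat rw [pvDiff_getElem]
      rw [show (2 : Int) + (r : Int) = ((r + 2 : Nat) : Int) by push_cast; ring,
        show (2 : Int) - 1 + (r : Int) - 0 = ((r + 1 : Nat) : Int) by push_cast; ring,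
        show (2 : Int) - 1 + (r : Int) - 1 = ((r : Nat) : Int) by push_cast; ring,
        hch (r + 2) (by omega), hch (r + 1) (by omega), hch r (by omega)]
      ring
    · have e3 : pvDiff^[Int.toNat 3] seq = pvDiff (pvDiff (pvDiff seq)) := rfl
      simp only [e3] at h2 ⊢
      rw [pvInner, show PySem.List.pyRange 0 3 1 = [0, 1, 2] from by decide]
      simp only [List.foldl_cons, List.foldl_nil,
        show PySem.List.pyGetD pvCoeffs 3 [] = [3, -3, 1] from by decide,
        show PySem.List.pyGetD [3, -3, 1] (0 : Int) (0 : Int) = 3 from by decide,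
        show PySem.List.pyGetD [3, -3, 1] (1 : Int) (0 : Int) = -3 from by decide,
        show PySem.List.pyGetD [3, -3, 1] (2 : Int) (0 : Int) = 1 from by decide]
      rw [pvDiff_getElem _ _ h2]
      repeat rw [pvDiff_getElem]
      rw [show (3 : Int) + (r : Int) = ((r + 3 : Nat) : Int) by push_cast; ring,
        show (3 : Int) - 1 + (r : Int) - 0 = ((r + 2 : Nat) : Int) by push_cast; ring,
        show (3 : Int) - 1 + (r : Int) - 1 = ((r + 1 : Nat) : Int) by push_cast; ring,
        show (3 : Int) - 1 + (r : Int) - 2 = ((r : Nat) : Int) by push_cast; ring,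
        hch (r + 3) (by omega), hch (r + 2) (by omega), hch (r + 1) (by omega), hch r (by omega)]
      ring
    · have e4 : pvDiff^[Int.toNat 4] seq = pvDiff (pvDiff (pvDiff (pvDiff seq))) := rfl
      simp only [e4] at h2 ⊢
      rw [pvInner, show PySem.List.pyRange 0 4 1 = [0, 1, 2, 3] from by decide]
      simp only [List.foldl_cons, List.foldl_nil,
        show PySem.List.pyGetD pvCoeffs 4 [] = [4, -6, 4, -1] from by decide,
        show PySem.List.pyGetD [4, -6, 4, -1] (0 : Int) (0 : Int) = 4 from by decide,
        show PySem.List.pyGetD [4, -6, 4, -1] (1 : Int) (0 : Int) = -6 from by decide,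
        show PySem.List.pyGetD [4, -6, 4, -1] (2 : Int) (0 : Int) = 4 from by decide,
        show PySem.List.pyGetD [4, -6, 4, -1] (3 : Int) (0 : Int) = -1 from by decide]
      rw [pvDiff_getElem _ _ h2]
      repeat rw [pvDiff_getElem]
      rw [show (4 : Int) + (r : Int) = ((r + 4 : Nat) : Int) by push_cast; ring,
        show (4 : Int) - 1 + (r : Int) - 0 = ((r + 3 : Nat) : Int) by push_cast; ring,
        show (4 : Int) - 1 + (r : Int) - 1 = ((r + 2 : Nat) : Int) by push_cast; ring,
        show (4 : Int) - 1 + (r : Int) - 2 = ((r + 1 : Nat) : Int) by push_cast; ring,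
        show (4 : Int) - 1 + (r : Int) - 3 = ((r : Nat) : Int) by push_cast; ring,
        hch (r + 4) (by omega), hch (r + 3) (by omega), hch (r + 2) (by omega),
        hch (r + 1) (by omega), hch r (by omega)]
      ring

-- ===== VERDICT (by name: the statements are the Claim_ definitions above) =====
theorem fixed_lpc_spec : Claim_equal_fixed_lpc := by
  intro channel num_samples pred_ord _ hpre
  unfold Spec_fixed_lpc
  rcases hpre with ⟨hp0, hns, hd⟩ | ⟨hns, hp0, hk⟩ | ⟨hnp, hp, hk⟩
  · exact main_eq channel num_samples pred_ord hns hp0 hd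
  · exact degenerate_eq channel num_samples pred_ord (by omega)
      (by rw [neg_slice_length channel num_samples hns]; omega)
  · exact degenerate_eq channel num_samples pred_ord (by omega)
      (by rw [neg_slice_length channel num_samples (by omega)]; omega)
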